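-- pv_equiv track=rewrite | github.com/tommasoboccali/MVM-cnaf | cgi-bin/gsheet_actions_v2.py | getIDsForm
-- ===== SOURCE A (Python) =====
-- def getIDsForm(mydict, VERB=True):
--
--     # I need to define options as a map
--     optionmapUNFILLED = {}
--     optionmapFILLED = {}
--     for site in mydict.keys():
--         if (VERB==True):
--             print ("Key ",site)
--             print (mydict[site].values())
--
--         for campaign in mydict[site].keys():
--            for id in mydict[site][campaign].keys():
--               if mydict[site][campaign][id]['MVM_filename'][0] == "" and mydict[site][campaign][id]['simulator_filename'][0] == "":
--                  # to be put in UNFILLED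
--                  if site not in optionmapUNFILLED.keys():
--                      optionmapUNFILLED[site] = {}
--                  if campaign not in optionmapUNFILLED[site].keys():
--                      optionmapUNFILLED[site][campaign] = []
--                  optionmapUNFILLED[site][campaign].append(id)
--               else:
--                  if site not in optionmapFILLED.keys():
--                      optionmapFILLED[site] = {}
--                  if campaign not in optionmapFILLED[site].keys():
--                      optionmapFILLED[site][campaign] = []
--                  optionmapFILLED[site][campaign].append(id)
--     return (optionmapFILLED,optionmapUNFILLED)
-- ===== SOURCE B (Python) =====
-- def getIDsForm(mydict, VERB=True):
--     # Two-pass: flatten to (site, campaign, id, filled) records, then distribute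
--     # with setdefault grouping.  Same return value as the original.
--     records = []
--     for site in mydict.keys():
--         if (VERB==True):
--             print ("Key ",site)
--             print (mydict[site].values())
--         for campaign, iddict in mydict[site].items():
--             for id, rec in iddict.items():
--                 filled = not (rec['MVM_filename'][0] == "" and rec['simulator_filename'][0] == "")
--                 records.append((site, campaign, id, filled))
--     optionmapFILLED = {}
--     optionmapUNFILLED = {}
--     for site, campaign, id, filled in records:
--         target = optionmapFILLED if filled else optionmapUNFILLED
--         target.setdefault(site, {}).setdefault(campaign, []).append(id)
--     return (optionmapFILLED, optionmapUNFILLED)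
-- ===== Notes on version B (the rewrite author's own statement) =====
-- stated objective: alternative
-- what changed: Replaced the inline nested membership-check bucketing with a two-pass decomposition: first flatten the nested dicts into a flat list of (site, campaign, id, filled) records, then distribute the records into the two maps via setdefault grouping.
import Mathlib
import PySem

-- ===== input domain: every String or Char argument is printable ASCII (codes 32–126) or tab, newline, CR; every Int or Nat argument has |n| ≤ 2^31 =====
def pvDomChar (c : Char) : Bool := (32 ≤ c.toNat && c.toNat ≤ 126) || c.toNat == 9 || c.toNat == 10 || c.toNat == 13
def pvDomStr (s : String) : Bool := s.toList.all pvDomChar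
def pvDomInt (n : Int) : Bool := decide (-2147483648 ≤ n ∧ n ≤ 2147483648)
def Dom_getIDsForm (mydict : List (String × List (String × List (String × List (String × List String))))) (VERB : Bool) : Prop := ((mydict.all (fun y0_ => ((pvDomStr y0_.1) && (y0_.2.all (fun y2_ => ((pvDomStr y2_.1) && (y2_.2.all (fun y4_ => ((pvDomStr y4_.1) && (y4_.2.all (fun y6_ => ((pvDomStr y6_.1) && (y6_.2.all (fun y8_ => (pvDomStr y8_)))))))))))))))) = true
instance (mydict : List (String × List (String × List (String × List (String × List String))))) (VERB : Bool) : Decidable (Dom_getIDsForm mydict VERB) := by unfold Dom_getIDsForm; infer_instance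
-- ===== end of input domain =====

-- B replaces A's inline nested membership-check bucketing by a two-pass decomposition
-- (flatten to flat (site,campaign,id,filled) records, then setdefault-group them);
-- same return value, prints ignored (the ports model the return value only).

-- ===== PORT A =====
-- mydict[site][campaign][id]['MVM_filename'][0] == "" and … (short-circuit; total
-- via defaults, exact under Pre_ which excludes the raising lookups)
def pvFlagA (rec : List (String × List String)) : Bool :=
  (PySem.List.pyGetD (PySem.Dict.getD (PySem.Dict.mk rec) "MVM_filename" []) 0 "" == "")
    && (PySem.List.pyGetD (PySem.Dict.getD (PySem.Dict.mk rec) "simulator_filename" []) 0 "" == "")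

-- the three statements 'if site not in …: …[site] = {}', 'if campaign not in …: … = []',
-- '….append(id)' (append = overwrite-in-place insert of the extended list)
def pvPutA (m : PySem.Dict String (PySem.Dict String (List String))) (site campaign id : String) :
    PySem.Dict String (PySem.Dict String (List String)) :=
  let m := if m.contains site then m else m.insert site PySem.Dict.empty
  let inner := m.getD site PySem.Dict.empty
  let inner := if inner.contains campaign then inner else inner.insert campaign []
  m.insert site (inner.insert campaign (inner.getD campaign [] ++ [id]))

def pvOut (m : PySem.Dict String (PySem.Dict String (List String))) :
    List (String × List (String × List String)) :=
  m.items.map (fun p => (p.1, p.2.items))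

def getIDsForm (mydict : List (String × List (String × List (String × List (String × List String))))) (VERB : Bool) : (List (String × List (String × List String))) × (List (String × List (String × List String))) :=
  -- VERB only controls prints; the returned value does not depend on it
  let st := mydict.foldl (fun (acc : PySem.Dict String (PySem.Dict String (List String)) × PySem.Dict String (PySem.Dict String (List String))) s =>
      s.2.foldl (fun acc c =>
        c.2.foldl (fun acc idrec =>
          if pvFlagA idrec.2 then (acc.1, pvPutA acc.2 s.1 c.1 idrec.1)
          else (pvPutA acc.1 s.1 c.1 idrec.1, acc.2)) acc) acc)
    (PySem.Dict.empty, PySem.Dict.empty)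
  (pvOut st.1, pvOut st.2)

-- ===== PORT B =====
-- filled = not (rec['MVM_filename'][0] == "" and rec['simulator_filename'][0] == "")
def pvFlagB (rec : List (String × List String)) : Bool :=
  !((PySem.List.pyGetD (PySem.Dict.getD (PySem.Dict.mk rec) "MVM_filename" []) 0 "" == "")
    && (PySem.List.pyGetD (PySem.Dict.getD (PySem.Dict.mk rec) "simulator_filename" []) 0 "" == ""))

def pvOutB (m : PySem.Dict String (PySem.Dict String (List String))) :
    List (String × List (String × List String)) :=
  m.items.map (fun p => (p.1, p.2.items))

-- pass 1: flatten to (site, campaign, id, filled) records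
def pvRecords (mydict : List (String × List (String × List (String × List (String × List String))))) :
    List (String × String × String × Bool) :=
  mydict.flatMap (fun s => s.2.flatMap (fun c => c.2.map (fun ir => (s.1, c.1, ir.1, pvFlagB ir.2))))

-- target.setdefault(site, {}).setdefault(campaign, []).append(id)
def pvBucket (m : PySem.Dict String (PySem.Dict String (List String))) (site campaign id : String) :
    PySem.Dict String (PySem.Dict String (List String)) :=
  m.modify site PySem.Dict.empty (fun inner => inner.modify campaign [] (fun ids => ids ++ [id]))

def getIDsForm_alt (mydict : List (String × List (String × List (String × List (String × List String))))) (VERB : Bool) : (List (String × List (String × List String))) × (List (String × List (String × List String))) :=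
  let st := (pvRecords mydict).foldl (fun (acc : PySem.Dict String (PySem.Dict String (List String)) × PySem.Dict String (PySem.Dict String (List String))) r =>
      if r.2.2.2 then (pvBucket acc.1 r.1 r.2.1 r.2.2.1, acc.2)
      else (acc.1, pvBucket acc.2 r.1 r.2.1 r.2.2.1)) (PySem.Dict.empty, PySem.Dict.empty)
  (pvOutB st.1, pvOutB st.2)

-- ===== PRECONDITION & SPEC =====
-- Pre_ excludes exactly the inputs on which Python A raises: a record whose
-- 'MVM_filename' lookup/indexing fails (KeyError/IndexError), or whose MVM first
-- entry is "" and whose 'simulator_filename' lookup/indexing fails.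
def pvRecOK (rec : List (String × List String)) : Bool :=
  let mvm := PySem.Dict.getD (PySem.Dict.mk rec) "MVM_filename" []
  !mvm.isEmpty &&
    (if PySem.List.pyGetD mvm 0 "" == "" then
      !(PySem.Dict.getD (PySem.Dict.mk rec) "simulator_filename" []).isEmpty
     else true)

def Pre_getIDsForm (mydict : List (String × List (String × List (String × List (String × List String))))) (VERB : Bool) : Prop :=
  (mydict.all (fun s => s.2.all (fun c => c.2.all (fun r => pvRecOK r.2)))) = true
instance (mydict : List (String × List (String × List (String × List (String × List String))))) (VERB : Bool) : Decidable (Pre_getIDsForm mydict VERB) := by unfold Pre_getIDsForm; infer_instance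

def pvWitness_getIDsForm : (List (String × List (String × List (String × List (String × List String))))) × Bool :=
  ([("site1", [("camp", [("id1", [("MVM_filename", [""]), ("simulator_filename", ["sim.txt"])]),
                         ("id2", [("MVM_filename", [""]), ("simulator_filename", [""])])])])], false)

def Spec_getIDsForm (mydict : List (String × List (String × List (String × List (String × List String))))) (VERB : Bool) (out : (List (String × List (String × List String))) × (List (String × List (String × List String)))) : Prop := out = getIDsForm_alt mydict VERB
instance (mydict : List (String × List (String × List (String × List (String × List String))))) (VERB : Bool) (out : (List (String × List (String × List String))) × (List (String × List (String × List String)))) : Decidable (Spec_getIDsForm mydict VERB out) := by unfold Spec_getIDsForm; infer_instance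

-- ===== CLAIM (what is proved, stated in full; the proofs are below) =====
def Claim_equal_getIDsForm : Prop := ∀ (mydict : List (String × List (String × List (String × List (String × List String))))) (VERB : Bool), Dom_getIDsForm mydict VERB → Pre_getIDsForm mydict VERB → Spec_getIDsForm mydict VERB (getIDsForm mydict VERB)

-- ===== LEMMAS AND PROOFS =====
lemma pvPut_shape {ν : Type} (d : PySem.Dict String ν) (k : String) (dflt : ν) (g : ν → ν) :
    (let d2 := if d.contains k then d else d.insert k dflt
     d2.insert k (g (d2.getD k dflt))) = d.insert k (g (d.getD k dflt)) := by
  by_cases h : d.contains k = true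
  · simp [h]
  · simp only [h, if_false, Bool.false_eq_true]
    rw [PySem.Dict.getD_insert_self, PySem.Dict.insert_insert_self,
        PySem.Dict.getD_of_not_contains d dflt (by simpa using h)]

lemma pvPutA_eq_pvBucket (m : PySem.Dict String (PySem.Dict String (List String)))
    (site campaign id : String) : pvPutA m site campaign id = pvBucket m site campaign id := by
  unfold pvPutA pvBucket PySem.Dict.modify
  rw [pvPut_shape m site PySem.Dict.empty
        (fun inner =>
          (if inner.contains campaign then inner else inner.insert campaign []).insert campaign
            ((if inner.contains campaign then inner else inner.insert campaign []).getD campaign [] ++ [id]))]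
  rw [pvPut_shape (m.getD site PySem.Dict.empty) campaign [] (fun ids => ids ++ [id])]

lemma pvFlagB_eq (r : List (String × List String)) : pvFlagB r = !pvFlagA r := rfl

lemma main_eq (mydict : List (String × List (String × List (String × List (String × List String))))) (VERB : Bool) :
    getIDsForm mydict VERB = getIDsForm_alt mydict VERB := by
  unfold getIDsForm getIDsForm_alt pvRecords pvOutB pvOut
  simp only [List.foldl_flatMap, List.foldl_map]
  have hstep : ∀ (acc : PySem.Dict String (PySem.Dict String (List String)) × PySem.Dict String (PySem.Dict String (List String))) (s1 c1 : String) (ir : String × List (String × List String)),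
      (if pvFlagA ir.2 then (acc.1, pvPutA acc.2 s1 c1 ir.1) else (pvPutA acc.1 s1 c1 ir.1, acc.2))
      = (if pvFlagB ir.2 then (pvBucket acc.1 s1 c1 ir.1, acc.2) else (acc.1, pvBucket acc.2 s1 c1 ir.1)) := by
    intro acc s1 c1 ir
    rw [pvFlagB_eq]
    cases pvFlagA ir.2 <;> simp [pvPutA_eq_pvBucket]
  simp only [hstep]

-- ===== VERDICT (by name: the statement is the Claim_ definition above) =====
theorem getIDsForm_spec : Claim_equal_getIDsForm := by
  intro mydict VERB _ _
  exact main_eq mydict VERB
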